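-- pv_equiv track=rewrite | github.com/mjanez/ckan-pycsw | ckan2pycsw/model/template.py | get_language_alternate
-- ===== SOURCE A (Python) =====
-- def get_language_alternate(default_language, languages=None):
--     """
--     Get the alternate language from a list of languages, excluding duplicates, and return it.
--
--     :param default_language (str): The default language.
--     :param languages (list): A list of language codes.
--
--     :returns: str or None: The alternate language code, or None if no alternate language is found.
--     """
--     # Check if a list of languages was not provided
--     if languages is None or not isinstance(languages, list):
--         return None
--
--     # Create a set to store unique languages
--     unique_languages = set()
--
--     # Initialize the alternate language as None
--     language_alternate = None
--
--     for language in languages: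
--         # Check if the language is unique
--         if language not in unique_languages:
--             unique_languages.add(language)
--             # If it is different from the default language, set it as the alternate language
--             if language != default_language:
--                 language_alternate = language
--
--     return language_alternate
-- ===== SOURCE B (Python) =====
-- def get_language_alternate(default_language, languages=None):
--     # Count occurrences, then scan back-to-front decrementing counts: an element
--     # whose count drops to zero at its position is a first occurrence; return the
--     # first such element (from the end) that differs from the default.
--     if languages is None or not isinstance(languages, list):
--         return None
--     counts = {}
--     for l in languages:
--         counts[l] = counts.get(l, 0) + 1
--     for l in reversed(languages):
--         counts[l] -= 1
--         if counts[l] == 0 and l != default_language: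
--             return l
--     return None
-- ===== Notes on version B (the rewrite author's own statement) =====
-- stated objective: alternative
-- what changed: Replaces the forward dedup loop (seen-set plus running alternate variable) by an occurrence-counting pass followed by a back-to-front scan that decrements counts and returns the first element whose count reaches zero and that differs from the default; no seen-set or dedup order is maintained.
import Mathlib
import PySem

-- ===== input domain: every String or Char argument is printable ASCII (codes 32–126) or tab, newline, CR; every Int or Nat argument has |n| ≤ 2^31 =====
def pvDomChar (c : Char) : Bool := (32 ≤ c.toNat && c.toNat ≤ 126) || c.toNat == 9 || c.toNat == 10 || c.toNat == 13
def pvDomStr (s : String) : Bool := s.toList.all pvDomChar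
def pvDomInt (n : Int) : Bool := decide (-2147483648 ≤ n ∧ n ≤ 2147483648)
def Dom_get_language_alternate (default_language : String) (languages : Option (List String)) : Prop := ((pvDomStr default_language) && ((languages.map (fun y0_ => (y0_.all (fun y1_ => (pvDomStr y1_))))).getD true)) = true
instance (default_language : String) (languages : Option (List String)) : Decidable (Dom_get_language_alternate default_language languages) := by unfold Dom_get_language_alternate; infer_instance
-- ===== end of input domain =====

-- B replaces A's forward dedup loop by an occurrence-counting pass plus a back-to-front scan; same return value, no speed claim.

-- ===== PORT A =====
-- the single loop over languages, carrying the seen-set and the running alternate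
def get_language_alternate (default_language : String) (languages : Option (List String)) : Option String :=
  match languages with
  | none => none
  | some ls =>
    (ls.foldl (fun (st : PySem.Set String × Option String) language =>
        if PySem.Set.contains st.1 language then st
        else (PySem.Set.add st.1 language,
              if language != default_language then some language else st.2))
      (PySem.Set.empty, none)).2

-- ===== PORT B =====
-- first loop: count occurrences (counts[l] = counts.get(l, 0) + 1)
def pvCountUp (ls : List String) : PySem.Dict String Int :=
  ls.foldl (fun c l => c.insert l (c.getD l 0 + 1)) PySem.Dict.empty

-- second loop: over reversed(languages), decrement, return on count zero and ≠ default
def pvRevScan (d : String) : PySem.Dict String Int → List String → Option String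
  | _, [] => none
  | counts, l :: rest =>
    let counts' := counts.insert l (counts.getD l 0 - 1)
    if counts'.getD l 0 == 0 && l != d then some l
    else pvRevScan d counts' rest

def get_language_alternate_alt (default_language : String) (languages : Option (List String)) : Option String :=
  match languages with
  | none => none
  | some ls => pvRevScan default_language (pvCountUp ls) ls.reverse

-- ===== PRECONDITION & SPEC =====
def Spec_get_language_alternate (default_language : String) (languages : Option (List String)) (out : Option String) : Prop := out = get_language_alternate_alt default_language languages
instance (default_language : String) (languages : Option (List String)) (out : Option String) : Decidable (Spec_get_language_alternate default_language languages out) := by unfold Spec_get_language_alternate; infer_instance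

-- ===== CLAIM (what is proved, stated in full; the proofs are below) =====
def Claim_equal_get_language_alternate : Prop := ∀ (default_language : String) (languages : Option (List String)), Dom_get_language_alternate default_language languages → Spec_get_language_alternate default_language languages (get_language_alternate default_language languages)

-- ===== LEMMAS AND PROOFS =====

-- the elements of xs that are new relative to `seen`, first occurrences in order
def pvNewU (seen : PySem.Set String) : List String → List String
  | [] => []
  | l :: xs => if PySem.Set.contains seen l then pvNewU seen xs
               else l :: pvNewU (PySem.Set.add seen l) xs

theorem pvNewU_append (xs : List String) : ∀ (seen : PySem.Set String),
    seen ++ pvNewU seen xs = xs.foldl PySem.Set.add seen := by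
  induction xs with
  | nil => intro seen; simp [pvNewU]
  | cons l xs ih =>
    intro seen
    simp only [pvNewU, List.foldl_cons]
    by_cases h : PySem.Set.contains seen l
    · have hadd : PySem.Set.add seen l = seen := by simp [PySem.Set.add, List.mem_of_elem_eq_true h]
      rw [if_pos h, hadd, ih]
    · have h' : l ∉ seen := fun hm => h (List.elem_eq_true_of_mem hm)
      have hadd : PySem.Set.add seen l = seen ++ [l] := by simp [PySem.Set.add, h']
      rw [if_neg h, hadd, ← ih (seen ++ [l])]
      simp

theorem pvNewU_empty (xs : List String) : pvNewU PySem.Set.empty xs = PySem.List.dedup xs := by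
  have h := pvNewU_append xs PySem.Set.empty
  simp only [PySem.Set.empty, List.nil_append] at h
  rw [show PySem.Set.empty = ([] : List String) from rfl, h,
    PySem.List.dedup_eq_ofList, PySem.Set.ofList_eq_foldl]

theorem pvGetLast?_cons (l : String) (rest : List String) :
    (l :: rest).getLast? = rest.getLast?.or (some l) := by
  rw [List.getLast?_cons]
  cases rest.getLast? <;> rfl

theorem pvLoop_eq (d : String) (xs : List String) :
    ∀ (seen : PySem.Set String) (alt : Option String),
    (xs.foldl (fun (st : PySem.Set String × Option String) language =>
        if PySem.Set.contains st.1 language then st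
        else (PySem.Set.add st.1 language,
              if language != d then some language else st.2))
      (seen, alt)).2
    = ((pvNewU seen xs).filter (fun l => l != d)).getLast?.or alt := by
  induction xs with
  | nil => intro seen alt; simp [pvNewU]
  | cons l xs ih =>
    intro seen alt
    simp only [List.foldl_cons, pvNewU]
    by_cases h : PySem.Set.contains seen l
    · rw [if_pos h, if_pos h, ih]
    · rw [if_neg h, if_neg h, ih, List.filter_cons]
      by_cases hd : (l != d) = true
      · rw [if_pos hd, if_pos hd, pvGetLast?_cons, Option.or_assoc, Option.some_or]
      · rw [if_neg hd, if_neg hd]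

-- pvRevScan only looks at counts through getD
theorem pvRevScan_congr (d : String) (xs : List String) :
    ∀ (c1 c2 : PySem.Dict String Int), (∀ y, c1.getD y 0 = c2.getD y 0) →
    pvRevScan d c1 xs = pvRevScan d c2 xs := by
  induction xs with
  | nil => intro c1 c2 _; rfl
  | cons l rest ih =>
    intro c1 c2 h
    have h' : ∀ y, (c1.insert l (c1.getD l 0 - 1)).getD y 0
        = (c2.insert l (c2.getD l 0 - 1)).getD y 0 := by
      intro y
      rw [PySem.Dict.getD_insert, PySem.Dict.getD_insert, h l]
      split
      · rfl
      · exact h y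
    simp only [pvRevScan]
    rw [h' l, ih _ _ h']

-- the counting loop computes occurrence counts
theorem pvCountUp_getD (ms : List String) (y : String) :
    (pvCountUp ms).getD y 0 = (ms.count y : Int) := by
  rw [pvCountUp, PySem.Dict.getD_foldl_insert_add_one, PySem.Dict.getD_empty]
  simp

-- B computes the last element of the filtered dedup list
theorem pvRevScan_eq (d : String) (ls : List String) :
    pvRevScan d (pvCountUp ls) ls.reverse
      = ((PySem.List.dedup ls).filter (fun l => l != d)).getLast? := by
  induction ls using List.reverseRecOn with
  | nil => simp [pvRevScan, pvCountUp, PySem.List.dedup]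
  | append_singleton ls x ih =>
    have hx : (pvCountUp (ls ++ [x])).getD x 0 - 1 = (ls.count x : Int) := by
      rw [pvCountUp_getD, List.count_append]
      simp
    rw [List.reverse_append, List.reverse_singleton, List.singleton_append,
      PySem.List.dedup_eq_ofList, PySem.Set.ofList_append_singleton,
      ← PySem.List.dedup_eq_ofList]
    simp only [pvRevScan, PySem.Dict.getD_insert_self, hx]
    have hcongr : pvRevScan d ((pvCountUp (ls ++ [x])).insert x ((ls.count x : Int))) ls.reverse
        = pvRevScan d (pvCountUp ls) ls.reverse := by
      refine pvRevScan_congr d ls.reverse _ _ (fun y => ?_)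
      rw [PySem.Dict.getD_insert]
      split
      · next heq => subst heq; exact (pvCountUp_getD ls y).symm
      · next hne =>
        have h0 : List.count y [x] = 0 := List.count_eq_zero.mpr (by simp [hne])
        rw [pvCountUp_getD, List.count_append, h0, pvCountUp_getD]
        simp
    by_cases hm : x ∈ ls
    · have hc : PySem.Set.contains (PySem.List.dedup ls) x = true := by
        simp [PySem.Set.contains, hm]
      rw [if_neg (by simp [List.count_eq_zero, hm]), hcongr, ih, PySem.Set.add, if_pos hc]
    · by_cases hd : (x != d) = true
      · rw [if_pos (by simp [hd, List.count_eq_zero]; exact hm),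
          PySem.Set.add, if_neg (by simp; exact hm),
          List.filter_append, List.filter_singleton]
        simp [hd, List.getLast?_append]
      · have hd' : (x != d) = false := by simpa using hd
        rw [if_neg (by simp [hd']), hcongr, ih, PySem.Set.add, if_neg (by simp; exact hm),
          List.filter_append, List.filter_singleton]
        simp [hd']

-- ===== VERDICT (by name: the statement is the Claim_ definition above) =====
theorem get_language_alternate_spec : Claim_equal_get_language_alternate := by
  intro d langs _
  unfold Spec_get_language_alternate get_language_alternate get_language_alternate_alt
  cases langs with
  | none => rfl
  | some ls =>
    simp only
    rw [pvLoop_eq d ls PySem.Set.empty none, pvNewU_empty, pvRevScan_eq]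
    exact Option.or_none
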